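-- pv_equiv track=rewrite | github.com/reyco2000/Vintage-Image-Viewer | vintage_image_viewer.py | _decode_bitmap
-- ===== SOURCE A (Python) =====
-- def _decode_bitmap(data, width, height):
--     """Decode uncompressed bitmap data"""
--     pixels = []
--
--     for byte in data:
--         # Expand each bit to a pixel
--         for bit in range(7, -1, -1):
--             pixel_value = 255 if (byte >> bit) & 1 == 0 else 0
--             pixels.append(pixel_value)
--             if len(pixels) >= width * height:
--                 break
--         if len(pixels) >= width * height:
--             break
--
--     # Pad if needed
--     while len(pixels) < width * height:
--         pixels.append(255)
--
--     return pixels[:width * height]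
-- ===== SOURCE B (Python) =====
-- def _decode_bitmap(data, width, height):
--     """Decode uncompressed bitmap data (output-indexed: compute each pixel directly)."""
--     total = width * height
--     out = []
--     for i in range(total):
--         j = i // 8
--         if j < len(data):
--             out.append(255 if (data[j] >> (7 - i % 8)) & 1 == 0 else 0)
--         else:
--             out.append(255)
--     return out
-- ===== Notes on version B (the rewrite author's own statement) =====
-- stated objective: simpler
-- what changed: B is output-indexed: one loop over range(width*height) computing each pixel directly from data[i//8] bit (7-i%8) (255 past the data), replacing A's input-driven nested bit loop with interleaved break/pad/slice logic.
import Mathlib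
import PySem

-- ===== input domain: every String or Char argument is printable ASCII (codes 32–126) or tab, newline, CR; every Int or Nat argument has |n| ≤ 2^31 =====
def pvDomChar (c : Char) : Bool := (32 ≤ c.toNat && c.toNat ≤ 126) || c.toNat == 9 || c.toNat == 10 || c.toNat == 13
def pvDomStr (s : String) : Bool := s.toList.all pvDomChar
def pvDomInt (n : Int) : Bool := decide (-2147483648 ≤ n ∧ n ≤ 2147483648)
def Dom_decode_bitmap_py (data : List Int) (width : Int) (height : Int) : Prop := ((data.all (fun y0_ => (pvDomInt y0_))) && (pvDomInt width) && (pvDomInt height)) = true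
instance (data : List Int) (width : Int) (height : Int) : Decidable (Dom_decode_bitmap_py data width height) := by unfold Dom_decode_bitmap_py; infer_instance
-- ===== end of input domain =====

-- B replaces A's input-driven nested bit loop (with interleaved break, pad and slice) by one
-- output-indexed loop computing each of the width*height pixels directly: simpler.

-- ===== PORT A =====

-- inner 'for bit in range(7,-1,-1)' loop with its break; bit ≥ 0 always, so '.toNat' on the
-- shift amount is exact for Python's 'byte >> bit'
def pvInnerA (total byte : Int) (bits pixels : List Int) : List Int :=
  match bits with
  | [] => pixels
  | bit :: rest =>
    let pv : Int := if PySem.Int.band (byte >>> bit.toNat) 1 == 0 then 255 else 0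
    let pixels' := pixels ++ [pv]
    if (pixels'.length : Int) ≥ total then pixels' else pvInnerA total byte rest pixels'

-- outer 'for byte in data' loop with its break
def pvOuterA (total : Int) (ds pixels : List Int) : List Int :=
  match ds with
  | [] => pixels
  | byte :: rest =>
    let pixels' := pvInnerA total byte (PySem.List.pyRange 7 (-1) (-1)) pixels
    if (pixels'.length : Int) ≥ total then pixels' else pvOuterA total rest pixels'

-- 'while len(pixels) < width*height: pixels.append(255)': the guard is kept literally; the
-- loop body grows pixels by one, so (total - len).toNat iterations are exactly enough fuel
def pvPadGo (fuel : Nat) (total : Int) (pixels : List Int) : List Int :=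
  match fuel with
  | 0 => pixels
  | f + 1 => if (pixels.length : Int) < total then pvPadGo f total (pixels ++ [255]) else pixels

def pvPadA (total : Int) (pixels : List Int) : List Int :=
  pvPadGo ((total - pixels.length).toNat) total pixels

def decode_bitmap_py (data : List Int) (width : Int) (height : Int) : List Int :=
  PySem.List.slice (pvPadA (width * height) (pvOuterA (width * height) data []))
    none (some (width * height))

-- ===== PORT B =====

-- one pixel of B: j = i // 8 is in range under the guard, so data[j] is ported with pyGetD;
-- the shift amount 7 - i % 8 is in [0,7], so '.toNat' is exact for Python's '>>'
def pvPixelB (data : List Int) (i : Int) : Int :=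
  let j := PySem.Int.floordiv i 8
  if j < (data.length : Int) then
    if PySem.Int.band (PySem.List.pyGetD data j 0 >>> (7 - PySem.Int.mod i 8).toNat) 1 == 0
    then 255 else 0
  else 255

def decode_bitmap_py_alt (data : List Int) (width : Int) (height : Int) : List Int :=
  (PySem.List.pyRange 0 (width * height) 1).foldl
    (fun out i => out ++ [pvPixelB data i]) []

-- ===== PRECONDITION & SPEC =====
def Spec_decode_bitmap_py (data : List Int) (width : Int) (height : Int) (out : List Int) : Prop := out = decode_bitmap_py_alt data width height
instance (data : List Int) (width : Int) (height : Int) (out : List Int) : Decidable (Spec_decode_bitmap_py data width height out) := by unfold Spec_decode_bitmap_py; infer_instance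

-- ===== CLAIM (what is proved, stated in full; the proofs are below) =====
def Claim_equal_decode_bitmap_py : Prop := ∀ (data : List Int) (width : Int) (height : Int), Dom_decode_bitmap_py data width height → Spec_decode_bitmap_py data width height (decode_bitmap_py data width height)

-- ===== LEMMAS AND PROOFS =====

-- one byte expanded to its 8 pixels, MSB first (proof-side notion)
def pvExpand8 (byte : Int) : List Int :=
  [7, 6, 5, 4, 3, 2, 1, 0].map
    (fun bit : Int => if PySem.Int.band (byte >>> bit.toNat) 1 == 0 then 255 else 0)

theorem pvRange7 : PySem.List.pyRange 7 (-1) (-1) = [7, 6, 5, 4, 3, 2, 1, 0] := by decide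

theorem pvInnerA_char (total byte : Int) (n : Nat) (hn : total = (n : Int))
    (bits pixels : List Int) (h : pixels.length < n) :
    pvInnerA total byte bits pixels =
      ((pixels ++ bits.map (fun bit : Int => if PySem.Int.band (byte >>> bit.toNat) 1 == 0 then 255 else 0)).take
        (min (pixels.length + bits.length) n)) := by
  set f : Int → Int := fun bit : Int => if PySem.Int.band (byte >>> bit.toNat) 1 == 0 then 255 else 0 with hf
  induction bits generalizing pixels with
  | nil => simp [pvInnerA]; omega
  | cons bit rest ih =>
    simp only [pvInnerA]
    by_cases hb : ((pixels ++ [f bit]).length : Int) ≥ total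
    · rw [if_pos hb]
      have hm : min (pixels.length + (bit :: rest).length) n = n := by
        simp at hb ⊢; omega
      have h1 : (pixels ++ f bit :: List.map f rest).take n = pixels ++ [f bit] := by
        rw [List.append_cons]
        rw [List.take_append_of_le_length (le_of_eq (by simp at hb ⊢; omega))]
        exact List.take_of_length_le (by simp at hb ⊢; omega)
      rw [List.map_cons, hm, h1]
    · rw [if_neg hb]
      rw [ih _ (by simp at hb ⊢; omega)]
      rw [List.map_cons]
      have h2 : pixels ++ f bit :: List.map f rest = (pixels ++ [f bit]) ++ List.map f rest :=
        List.append_cons _ _ _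
      rw [h2]
      congr 1
      simp
      omega

theorem pvOuterA_char (total : Int) (n : Nat) (hn : total = (n : Int))
    (ds pixels : List Int) (h : pixels.length < n) :
    pvOuterA total ds pixels =
      ((pixels ++ ds.flatMap pvExpand8).take (min (pixels.length + 8 * ds.length) n)) := by
  induction ds generalizing pixels with
  | nil => simp [pvOuterA]; omega
  | cons byte rest ih =>
    simp only [pvOuterA, pvRange7]
    rw [pvInnerA_char total byte n hn _ pixels h]
    rw [show ([7, 6, 5, 4, 3, 2, 1, 0] : List Int).length = 8 from rfl]
    rw [← pvExpand8]
    have hlen8 : (pvExpand8 byte).length = 8 := by simp [pvExpand8]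
    have hflat : (byte :: rest).flatMap pvExpand8 = pvExpand8 byte ++ rest.flatMap pvExpand8 := by
      simp
    by_cases hb : pixels.length + 8 ≥ n
    · have hmin : min (pixels.length + 8) n = n := by omega
      rw [hmin]
      have hlenT : ((pixels ++ pvExpand8 byte).take n).length = n := by
        simp [hlen8]; omega
      rw [if_pos (by rw [hlenT]; omega)]
      have hmin2 : min (pixels.length + 8 * (rest.length + 1)) n = n := by omega
      simp only [List.length_cons, hmin2, hflat, ← List.append_assoc]
      conv_rhs => rw [List.take_append_of_le_length (show n ≤ (pixels ++ pvExpand8 byte).length by simp [hlen8]; omega)]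
    · have hmin : min (pixels.length + 8) n = pixels.length + 8 := by omega
      rw [hmin]
      have htk : (pixels ++ pvExpand8 byte).take (pixels.length + 8) = pixels ++ pvExpand8 byte := by
        apply List.take_of_length_le; simp [hlen8]
      rw [htk]
      rw [if_neg (by simp [hlen8]; omega)]
      rw [ih _ (by simp [hlen8]; omega)]
      simp only [List.length_cons, hflat, ← List.append_assoc]
      congr 1
      simp [hlen8]
      omega

theorem pvPadGo_char (fuel : Nat) (total : Int) (pixels : List Int)
    (hf : fuel = (total - pixels.length).toNat) :
    pvPadGo fuel total pixels = pixels ++ List.replicate fuel 255 := by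
  induction fuel generalizing pixels with
  | zero => simp [pvPadGo]
  | succ f ih =>
    rw [pvPadGo, if_pos (by omega)]
    rw [ih _ (by simp; omega)]
    rw [List.replicate_succ, List.append_cons]
    simp

theorem pvPadA_char (total : Int) (pixels : List Int) :
    pvPadA total pixels = pixels ++ List.replicate ((total - pixels.length).toNat) 255 := by
  rw [pvPadA, pvPadGo_char _ _ _ rfl]

theorem pvLenFlat (ds : List Int) : (ds.flatMap pvExpand8).length = 8 * ds.length := by
  induction ds with
  | nil => simp
  | cons b r ih => simp [pvExpand8] at ih ⊢; omega

theorem pvFlatMap_getElem? (ds : List Int) (k : Nat) (hk : k < 8 * ds.length) :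
    (ds.flatMap pvExpand8)[k]? = (pvExpand8 (ds.getD (k / 8) 0))[k % 8]? := by
  induction ds generalizing k with
  | nil => simp at hk
  | cons b r ih =>
    rw [List.flatMap_cons]
    have hlen : (pvExpand8 b).length = 8 := by simp [pvExpand8]
    by_cases h8 : k < 8
    · rw [List.getElem?_append_left (by omega)]
      have h1 : k / 8 = 0 := by omega
      have h2 : k % 8 = k := by omega
      simp only [h1, h2, List.getD_cons_zero]
    · rw [List.getElem?_append_right (by omega), hlen]
      have ihx := ih (k - 8) (by simp at hk; omega)
      have h2 : (k - 8) % 8 = k % 8 := by omega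
      have h3 : (b :: r).getD (k / 8) 0 = r.getD (k / 8 - 1) 0 := by
        have : k / 8 = (k / 8 - 1) + 1 := by omega
        rw [this, List.getD_cons_succ]
        simp
      have h1 : (k - 8) / 8 = k / 8 - 1 := by omega
      rw [ihx, h1, h2, h3]

theorem pvExpand8_getElem (b : Int) (m : Nat) (hm : m < 8) :
    (pvExpand8 b)[m]'(by simp [pvExpand8]; omega) =
      if PySem.Int.band (b >>> (7 - m)) 1 == 0 then 255 else 0 := by
  interval_cases m <;> rfl

theorem pvAltB_char (data : List Int) (width height : Int) :
    decode_bitmap_py_alt data width height =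
      (List.range (width * height).toNat).map (fun k : Nat => pvPixelB data (Int.ofNat k)) := by
  unfold decode_bitmap_py_alt
  rw [PySem.List.foldl_append_singleton_eq_map, PySem.List.pyRange_one, List.map_map]
  simp only [List.nil_append, sub_zero]
  apply List.map_congr_left
  intro k _
  simp only [Function.comp_def, zero_add, Int.ofNat_eq_natCast]

theorem pvPixelB_lt (data : List Int) (k : Nat) (hk : k < 8 * data.length) :
    pvPixelB data (k : Int) =
      if PySem.Int.band (data.getD (k / 8) 0 >>> (7 - k % 8)) 1 == 0 then 255 else 0 := by
  unfold pvPixelB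
  have hj : PySem.Int.floordiv (k : Int) 8 = ((k / 8 : Nat) : Int) := by
    exact_mod_cast PySem.Int.floordiv_natCast k 8
  have hm : PySem.Int.mod (k : Int) 8 = ((k % 8 : Nat) : Int) := by
    exact_mod_cast PySem.Int.mod_natCast k 8
  rw [hj, hm]
  rw [if_pos (by exact_mod_cast Nat.lt_of_mul_lt_mul_left (by omega : 8 * (k/8) < 8 * data.length))]
  have ht : ((7 : Int) - ((k % 8 : Nat) : Int)).toNat = 7 - k % 8 := by omega
  rw [ht, PySem.List.pyGetD_natCast]

theorem pvPixelB_ge (data : List Int) (k : Nat) (hk : 8 * data.length ≤ k) :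
    pvPixelB data (k : Int) = 255 := by
  unfold pvPixelB
  have hj : PySem.Int.floordiv (k : Int) 8 = ((k / 8 : Nat) : Int) := by
    exact_mod_cast PySem.Int.floordiv_natCast k 8
  rw [hj, if_neg (by exact_mod_cast (by omega : ¬ (k / 8) < data.length))]

-- ===== VERDICT (by name: the statement is the Claim_ definition above) =====
theorem decode_bitmap_py_spec : Claim_equal_decode_bitmap_py := by
  intro data width height _
  unfold Spec_decode_bitmap_py
  rw [pvAltB_char]
  unfold decode_bitmap_py
  by_cases hpos : 0 < width * height
  · -- positive pixel count
    set n := (width * height).toNat with hn0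
    have hn : width * height = (n : Int) := by omega
    have hnpos : 0 < n := by omega
    rw [pvOuterA_char (width * height) n hn data [] (by simpa using hnpos)]
    rw [pvPadA_char]
    rw [PySem.List.slice_to _ (le_of_lt hpos)]
    simp only [List.nil_append, List.length_nil, Nat.zero_add]
    have hEl : (data.flatMap pvExpand8).length = 8 * data.length := pvLenFlat data
    have hlenTake : ((data.flatMap pvExpand8).take (min (8 * data.length) n)).length
        = min (8 * data.length) n := by
      rw [List.length_take, hEl]; omega
    have hrep : ((width * height
        - (((data.flatMap pvExpand8).take (min (8 * data.length) n)).length : Int)).toNat)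
        = n - min (8 * data.length) n := by
      rw [hlenTake]; omega
    rw [hrep]
    have htn : (width * height).toNat = n := rfl
    apply List.ext_getElem?
    intro k
    rw [List.getElem?_take, List.getElem?_map, htn]
    by_cases hkn : k < n
    · rw [if_pos hkn, List.getElem?_range hkn]
      by_cases hkd : k < 8 * data.length
      · -- pixel comes from the data
        rw [List.getElem?_append_left (by rw [hlenTake]; omega)]
        rw [List.getElem?_take, if_pos (by omega)]
        rw [pvFlatMap_getElem? data k hkd]
        rw [List.getElem?_eq_getElem (show k % 8 < (pvExpand8 (data.getD (k / 8) 0)).length by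
          simp [pvExpand8]; omega)]
        rw [pvExpand8_getElem _ _ (by omega)]
        rw [Option.map_some, Int.ofNat_eq_natCast, pvPixelB_lt data k hkd]
      · -- past the data: padding byte 255
        rw [List.getElem?_append_right (by rw [hlenTake]; omega)]
        rw [List.getElem?_replicate, if_pos (by rw [hlenTake]; omega)]
        rw [Option.map_some, Int.ofNat_eq_natCast, pvPixelB_ge data k (by omega)]
    · rw [if_neg hkn]
      rw [List.getElem?_eq_none (by simp; omega)]
      simp
  · -- width*height ≤ 0: both sides are []
    have htz : (width * height).toNat = 0 := by omega
    rw [htz]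
    simp only [List.range_zero, List.map_nil]
    cases data with
    | nil =>
      simp only [pvOuterA]
      rw [pvPadA_char]
      have hz : ((width * height - (([] : List Int).length : Int)).toNat) = 0 := by simp; omega
      rw [hz]
      simp [PySem.List.slice, PySem.List.clampIdx]
    | cons byte rest =>
      simp only [pvOuterA, pvRange7, pvInnerA]
      rw [if_pos (by simp; omega), if_pos (by simp; omega)]
      rw [pvPadA_char]
      have hz : ((width * height - ((([] : List Int) ++ [if PySem.Int.band (byte >>> (7:Int).toNat) 1 == 0 then (255:Int) else 0]).length : Int)).toNat) = 0 := by
        simp; omega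
      rw [hz]
      rcases lt_or_eq_of_le (by omega : width * height ≤ 0) with hlt | heq
      · have hK : width * height = -(((-(width * height)).toNat : Nat) : Int) := by omega
        rw [hK, PySem.List.slice_to_neg_natCast _ _ (by omega)]
        simp only [List.take_eq_nil_iff]
        left
        simp only [List.length_append, List.length_cons, List.length_nil, List.length_replicate]
        omega
      · rw [heq, PySem.List.slice_to _ (le_refl 0)]
        simp
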